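-- pv_equiv track=rewrite | github.com/Aasthaengg/IBMdataset | Python_codes/p03338/s201426569.py | cut_and_count
-- ===== SOURCE A (Python) =====
-- from string import ascii_lowercase
--
-- def cut_and_count(s, n, i):
--     x = set(s[:i])
--     y = set(s[i:])
--     cnt = 0
--
--     for ch in ascii_lowercase:
--         if ch in x and ch in y:
--             cnt += 1
--     return cnt
-- ===== SOURCE B (Python) =====
-- from string import ascii_lowercase
--
-- def cut_and_count(s, n, i):
--     # One pass over the string recording each character's first and last
--     # occurrence index; a lowercase letter is common to both halves iff its
--     # first occurrence lies before the cut and its last occurrence at/after it.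
--     L = len(s)
--     c = i if i >= 0 else L + i
--     if c < 0:
--         c = 0
--     elif c > L:
--         c = L
--     span = {}
--     for j, ch in enumerate(s):
--         span[ch] = (span[ch][0], j) if ch in span else (j, j)
--     cnt = 0
--     for ch, (lo, hi) in span.items():
--         if ch in ascii_lowercase and lo < c and hi >= c:
--             cnt += 1
--     return cnt
-- ===== Notes on version B (the rewrite author's own statement) =====
-- stated objective: alternative
-- what changed: Instead of materialising the two halves' character sets and looping over the 26 letters testing membership, B makes a single indexed pass over the whole string recording each character's first and last occurrence index in a dict, then counts the recorded lowercase letters whose first occurrence is before the cut and last occurrence at or after it; no slice, no set is built.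
import Mathlib
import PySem

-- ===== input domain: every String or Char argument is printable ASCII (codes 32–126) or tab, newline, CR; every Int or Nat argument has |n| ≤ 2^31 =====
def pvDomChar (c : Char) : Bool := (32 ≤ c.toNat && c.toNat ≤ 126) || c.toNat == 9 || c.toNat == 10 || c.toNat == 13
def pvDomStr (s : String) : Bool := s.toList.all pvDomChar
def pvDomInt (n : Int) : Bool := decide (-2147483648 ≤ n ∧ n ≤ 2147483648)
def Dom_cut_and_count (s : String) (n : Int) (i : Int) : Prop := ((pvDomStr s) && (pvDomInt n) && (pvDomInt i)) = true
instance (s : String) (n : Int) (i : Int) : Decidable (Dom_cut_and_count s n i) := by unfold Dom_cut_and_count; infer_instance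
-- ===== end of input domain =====

-- B replaces A's two half-sets and 26-letter membership loop by ONE indexed pass over the whole
-- string recording each character's first/last occurrence index in a dict, then counts the
-- recorded lowercase letters whose span straddles the cut; objective: alternative (same cost).

-- ascii_lowercase (shared module constant)
def asciiLowercase : List Char := "abcdefghijklmnopqrstuvwxyz".toList

-- ===== PORT A =====
def cut_and_count (s : String) (n : Int) (i : Int) : Int :=
  let x := PySem.Set.ofList (PySem.List.slice s.toList none (some i))
  let y := PySem.Set.ofList (PySem.List.slice s.toList (some i) none)
  asciiLowercase.foldl (fun cnt ch => if PySem.Set.contains x ch && PySem.Set.contains y ch then cnt + 1 else cnt) 0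

-- ===== PORT B =====
def cut_and_count_alt (s : String) (n : Int) (i : Int) : Int :=
  let cs := s.toList
  let L : Int := (cs.length : Int)
  let c0 : Int := if 0 ≤ i then i else L + i
  let c : Int := if c0 < 0 then 0 else if L < c0 then L else c0
  let span := (PySem.List.enumerate cs 0).foldl
    (fun d p => d.insert p.2 (if d.contains p.2 then ((d.getD p.2 (0, 0)).1, p.1) else (p.1, p.1)))
    (PySem.Dict.empty : PySem.Dict Char (Int × Int))
  span.items.foldl
    (fun cnt q => if PySem.Chars.isIn [q.1] asciiLowercase && q.2.1 < c && c ≤ q.2.2 then cnt + 1 else cnt) 0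

-- ===== PRECONDITION & SPEC =====
def Spec_cut_and_count (s : String) (n : Int) (i : Int) (out : Int) : Prop := out = cut_and_count_alt s n i
instance (s : String) (n : Int) (i : Int) (out : Int) : Decidable (Spec_cut_and_count s n i out) := by unfold Spec_cut_and_count; infer_instance

-- ===== CLAIM (what is proved, stated in full; the proofs are below) =====
def Claim_equal_cut_and_count : Prop := ∀ (s : String) (n : Int) (i : Int), Dom_cut_and_count s n i → Spec_cut_and_count s n i (cut_and_count s n i)

-- ===== LEMMAS AND PROOFS =====

-- B's fold, named for the proofs.
def spanFold (cs : List Char) : PySem.Dict Char (Int × Int) :=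
  (PySem.List.enumerate cs 0).foldl
    (fun d p => d.insert p.2 (if d.contains p.2 then ((d.getD p.2 (0, 0)).1, p.1) else (p.1, p.1)))
    PySem.Dict.empty

-- index of the LAST occurrence of ch in cs (for ch ∈ cs)
def lastOcc (cs : List Char) (ch : Char) : Nat := cs.length - 1 - cs.reverse.idxOf ch

theorem mem_iff_singleton_infix (l : List Char) (c : Char) : c ∈ l ↔ [c] <:+: l := by
  constructor
  · intro h
    obtain ⟨u, v, rfl⟩ := List.append_of_mem h
    exact ⟨u, v, by simp⟩
  · intro h
    exact h.mem (by simp)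

theorem spanFold_keys (cs : List Char) : (spanFold cs).keys = PySem.List.dedup cs := by
  unfold spanFold
  rw [PySem.Dict.keys_foldl_insert_key (PySem.List.enumerate cs 0) (fun p => p.2)
        (fun d p => if d.contains p.2 then ((d.getD p.2 (0, 0)).1, p.1) else (p.1, p.1))]
  simp [PySem.List.map_snd_enumerate, PySem.Set.update, PySem.Set.ofList, PySem.List.dedup_eq_ofList]

theorem spanFold_contains (cs : List Char) (ch : Char) :
    (spanFold cs).contains ch = decide (ch ∈ cs) := by
  have hmem : ch ∈ (spanFold cs).keys ↔ ch ∈ cs := by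
    rw [spanFold_keys]; exact PySem.List.mem_dedup cs ch
  simp only [PySem.Dict.keys, List.mem_map] at hmem
  simp only [PySem.Dict.contains]
  by_cases h : ch ∈ cs
  · simp only [h, decide_true, List.any_eq_true]
    obtain ⟨p, hp, he⟩ := hmem.mpr h
    exact ⟨p, hp, by simp [he]⟩
  · simp only [h, decide_false, List.any_eq_false]
    intro p hp
    simp only [beq_iff_eq]
    intro he
    exact h (hmem.mp ⟨p, hp, he⟩)

theorem spanFold_getD (cs : List Char) (ch : Char) (h : ch ∈ cs) :
    (spanFold cs).getD ch (0, 0) = ((cs.idxOf ch : Int), (lastOcc cs ch : Int)) := by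
  induction cs using List.reverseRecOn with
  | nil => simp at h
  | append_singleton cs a ih =>
    have hstep : spanFold (cs ++ [a])
        = (spanFold cs).insert a
            (if (spanFold cs).contains a then (((spanFold cs).getD a (0, 0)).1, (cs.length : Int))
             else ((cs.length : Int), (cs.length : Int))) := by
      unfold spanFold
      rw [PySem.List.enumerate_append, List.foldl_append]
      simp [PySem.List.enumerate]
    by_cases hch : ch = a
    · subst hch
      rw [hstep, PySem.Dict.getD_insert_self]
      have hlast : lastOcc (cs ++ [ch]) ch = cs.length := by
        unfold lastOcc
        simp
      by_cases hmem : ch ∈ cs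
      · rw [spanFold_contains, ih hmem]
        simp [hmem, hlast, List.idxOf_append_of_mem hmem]
      · rw [spanFold_contains]
        simp [hmem, hlast, List.idxOf_append_of_notMem hmem]
    · have hmem : ch ∈ cs := by
        rcases List.mem_append.mp h with h' | h'
        · exact h'
        · simp at h'; exact absurd h' hch
      rw [hstep, PySem.Dict.getD_insert_of_ne _ _ _ hch, ih hmem]
      have hrev : ch ∈ cs.reverse := by simpa using hmem
      have hlt : cs.reverse.idxOf ch < cs.length := by
        simpa using List.idxOf_lt_length_of_mem hrev
      have hfst : (cs ++ [a]).idxOf ch = cs.idxOf ch := List.idxOf_append_of_mem hmem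
      have hlast : lastOcc (cs ++ [a]) ch = lastOcc cs ch := by
        unfold lastOcc
        have hne : a ≠ ch := fun e => hch e.symm
        simp [List.idxOf_cons_ne _ hne]
        omega
      rw [hfst, hlast]

-- membership in the dropped tail ↔ the last occurrence is at/after the cut
theorem mem_drop_iff_lastOcc (cs : List Char) (ch : Char) (C : Nat) (h : ch ∈ cs) :
    ch ∈ cs.drop C ↔ C ≤ lastOcc cs ch := by
  have hrev : ch ∈ cs.reverse := by simpa using h
  have hlt : cs.reverse.idxOf ch < cs.length := by
    simpa using List.idxOf_lt_length_of_mem hrev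
  have h1 : ch ∈ cs.drop C ↔ ch ∈ (cs.drop C).reverse := by simp
  rw [h1, List.reverse_drop, List.mem_take_iff_idxOf_lt hrev]
  unfold lastOcc
  omega

-- the two count predicates pick the same characters
theorem countP_eq_countP_of_nodup (u v : List Char) (hu : u.Nodup) (hv : v.Nodup)
    (P Q : Char → Bool) (h : ∀ ch, (ch ∈ u ∧ P ch = true) ↔ (ch ∈ v ∧ Q ch = true)) :
    u.countP P = v.countP Q := by
  rw [List.countP_eq_length_filter, List.countP_eq_length_filter,
    ← List.toFinset_card_of_nodup (hu.filter P), ← List.toFinset_card_of_nodup (hv.filter Q)]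
  congr 1
  ext c
  simp only [List.toFinset_filter, Finset.mem_filter, List.mem_toFinset]
  exact h c

-- ===== VERDICT (by name: the statement is the Claim_ definition above) =====
theorem cut_and_count_spec : Claim_equal_cut_and_count := by
  intro s n i _
  unfold Spec_cut_and_count cut_and_count cut_and_count_alt
  set cs := s.toList with hcs
  set C := PySem.List.clampIdx cs.length i with hC
  -- the two slices are take/drop at the clamped cut C
  have hx : PySem.List.slice cs none (some i) = cs.take C := by
    simp [PySem.List.slice, hC]
  have hy : PySem.List.slice cs (some i) none = cs.drop C := by
    simp only [PySem.List.slice]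
    rw [← hC, List.take_of_length_le (by simp)]
  -- B's computed cut equals (C : Int)
  have hc : (if (if 0 ≤ i then i else (cs.length : Int) + i) < 0 then 0
             else if (cs.length : Int) < (if 0 ≤ i then i else (cs.length : Int) + i)
                  then (cs.length : Int)
                  else (if 0 ≤ i then i else (cs.length : Int) + i)) = (C : Int) := by
    rw [hC]; unfold PySem.List.clampIdx
    simp only [Nat.min_def]
    split_ifs <;> omega
  have hCle : C ≤ cs.length := by
    rw [hC]; unfold PySem.List.clampIdx
    split_ifs <;> omega
  rw [PySem.List.foldl_count_if, PySem.List.foldl_count_if, hx, hy, hc]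
  have hnk : (spanFold cs).keys.Nodup := by
    rw [spanFold_keys]; exact PySem.List.nodup_dedup cs
  have hitems : ((spanFold cs)).items
      = (PySem.List.dedup cs).map (fun k => (k, (spanFold cs).getD k (0, 0))) := by
    rw [← spanFold_keys cs]
    exact PySem.Dict.items_eq_map_keys _ hnk (0, 0)
  have hsf : (List.foldl
      (fun d p => d.insert p.2 (if d.contains p.2 = true then ((d.getD p.2 (0, 0)).1, p.1) else (p.1, p.1)))
      PySem.Dict.empty (PySem.List.enumerate cs)) = spanFold cs := rfl
  rw [hsf, hitems, List.countP_map]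
  simp only [zero_add, Nat.cast_inj]
  apply countP_eq_countP_of_nodup _ _ (by decide) (PySem.List.nodup_dedup cs)
  intro ch
  simp only [Function.comp, Bool.and_eq_true, decide_eq_true_eq, PySem.List.mem_dedup]
  constructor
  · rintro ⟨hal, hx', hy'⟩
    have htk : ch ∈ cs.take C := by
      have := (PySem.Set.mem_ofList (cs.take C) ch).mp (by
        simpa [PySem.Set.contains] using hx')
      exact this
    have hdr : ch ∈ cs.drop C := by
      have := (PySem.Set.mem_ofList (cs.drop C) ch).mp (by
        simpa [PySem.Set.contains] using hy')
      exact this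
    have hmem : ch ∈ cs := List.take_subset _ _ htk
    refine ⟨hmem, ?_⟩
    rw [spanFold_getD cs ch hmem]
    dsimp only
    have hlo : cs.idxOf ch < C := (List.mem_take_iff_idxOf_lt hmem).mp htk
    have hhi : C ≤ lastOcc cs ch := (mem_drop_iff_lastOcc cs ch C hmem).mp hdr
    refine ⟨⟨?_, ?_⟩, ?_⟩
    · exact (PySem.Chars.isIn_iff_infix [ch] asciiLowercase).mpr
        ((mem_iff_singleton_infix _ ch).mp hal)
    · exact_mod_cast hlo
    · exact_mod_cast hhi
  · rintro ⟨hmem, ⟨hin, hlo⟩, hhi⟩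
    rw [spanFold_getD cs ch hmem] at hlo hhi
    dsimp only at hlo hhi
    have hal : ch ∈ asciiLowercase := (mem_iff_singleton_infix _ ch).mpr
      ((PySem.Chars.isIn_iff_infix [ch] asciiLowercase).mp hin)
    refine ⟨hal, ?_, ?_⟩
    · have : cs.idxOf ch < C := by exact_mod_cast hlo
      have htk := (List.mem_take_iff_idxOf_lt hmem).mpr this
      simp [PySem.Set.contains, PySem.Set.mem_ofList, htk]
    · have : C ≤ lastOcc cs ch := by exact_mod_cast hhi
      have hdr := (mem_drop_iff_lastOcc cs ch C hmem).mpr this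
      simp [PySem.Set.contains, PySem.Set.mem_ofList, hdr]
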